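-- pv_equiv track=rewrite | github.com/nickciliberto/python-codewars | typoglycemia-generator.py | scramble_words
-- ===== SOURCE A (Python) =====
-- def scramble_words(words):
-- #    import string
--     if words:
--         wordList = words.split(' ')
--         resultList = []
--         for word in wordList:
--             specialChars = []
--             word_without_special_chars = ''
--             for i in range(len(word)):
--                 if word[i] in "-',.":
--                     specialChars.append(i)
--                 else:
--                     word_without_special_chars = word_without_special_chars + word[i]
--             if len(word_without_special_chars) == 1:
--                 resultString = word
--             else:
--                 firstLetter = word_without_special_chars[0]
--                 lastLetter = word_without_special_chars[-1]
--                 sortedMiddle = ''.join(sorted(word_without_special_chars[1:-1]))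
--                 resultString = str(firstLetter + sortedMiddle + lastLetter)
--                 for index in specialChars:
--                     resultString = resultString[:index] + word[index] + resultString[index:]
--             resultList.append(resultString)
--         return ' '.join(resultList)
--     else:
--         return ''
-- ===== SOURCE B (Python) =====
-- SPECIALS = "-',."
--
-- def scramble_words(words):
--     if not words:
--         return ''
--
--     def fix(word):
--         letters = [c for c in word if c not in SPECIALS]
--         if len(letters) == 1:
--             return word
--         ordered = iter([letters[0]] + sorted(letters[1:-1]) + [letters[-1]])
--         return ''.join([c if c in SPECIALS else next(ordered) for c in word])
--
--     return ' '.join(fix(w) for w in words.split(' '))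
-- ===== Notes on version B (the rewrite author's own statement) =====
-- stated objective: simpler
-- what changed: A records special-char indices and re-inserts each into the sorted string by repeated slicing; B instead makes one merge pass over the original word, emitting special characters in place and consuming the next letter of [first]+sorted(middle)+[last] otherwise.
import Mathlib
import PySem

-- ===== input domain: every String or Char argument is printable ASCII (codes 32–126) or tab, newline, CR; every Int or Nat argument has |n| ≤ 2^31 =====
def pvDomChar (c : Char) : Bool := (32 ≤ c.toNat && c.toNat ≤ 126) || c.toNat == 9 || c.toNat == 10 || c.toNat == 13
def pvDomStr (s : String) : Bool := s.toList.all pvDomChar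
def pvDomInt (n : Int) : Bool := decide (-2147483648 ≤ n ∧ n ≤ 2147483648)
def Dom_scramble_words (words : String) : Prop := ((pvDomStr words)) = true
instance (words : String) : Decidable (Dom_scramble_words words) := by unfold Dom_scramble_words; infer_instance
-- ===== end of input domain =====

-- B replaces A's record-special-indices-then-splice reinsertion with a single merge pass over the
-- original word, consuming the letters of [first] ++ sorted(middle) ++ [last] in order.

-- the character class "-',." both Pythons test membership in
def pvSpecials : List Char := ['-', '\'', ',', '.']

-- ===== PORT A =====
-- the per-word body of A's loop
def pvAWord (word : List Char) : List Char :=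
  -- for i in range(len(word)): collect special indices / build word_without_special_chars
  let st := (PySem.List.pyRange 0 (word.length : Int) 1).foldl
    (fun (st : List Int × List Char) i =>
      if PySem.List.pyGetD word i ' ' ∈ pvSpecials then (st.1 ++ [i], st.2)
      else (st.1, st.2 ++ [PySem.List.pyGetD word i ' '])) ([], [])
  let specialChars := st.1
  let letters := st.2
  if letters.length = 1 then word
  else
    match PySem.List.pyGet? letters 0, PySem.List.pyGet? letters (-1) with
    | some firstLetter, some lastLetter =>
      let sortedMiddle := PySem.List.sorted (PySem.List.slice letters (some 1) (some (-1))) (fun c => c) false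
      let base := [firstLetter] ++ sortedMiddle ++ [lastLetter]
      -- for index in specialChars: resultString = resultString[:index] + word[index] + resultString[index:]
      specialChars.foldl (fun s i =>
        PySem.List.slice s none (some i) ++ [PySem.List.pyGetD word i ' '] ++ PySem.List.slice s (some i) none) base
    | _, _ => []  -- unreachable under Pre_: Python raises IndexError when letters is empty

def scramble_words (words : String) : String :=
  if words.toList = [] then ""
  else
    let wordList := PySem.Chars.splitOn words.toList [' ']
    let resultList := wordList.foldl (fun acc word => acc ++ [pvAWord word]) []
    String.ofList (PySem.Chars.join [' '] resultList)

-- ===== PORT B =====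
-- ''.join([c if c in SPECIALS else next(ordered) for c in word]) : one merge pass
def pvMerge (word : List Char) (ordered : List Char) : List Char :=
  match word with
  | [] => []
  | c :: cs =>
    if c ∈ pvSpecials then c :: pvMerge cs ordered
    else
      match ordered with
      | o :: os => o :: pvMerge cs os
      | [] => []  -- unreachable: the iterator holds exactly one letter per non-special character

def pvBWord (word : List Char) : List Char :=
  let letters := word.filter (fun c => ¬ c ∈ pvSpecials)
  if letters.length = 1 then word
  else
    match PySem.List.pyGet? letters 0, PySem.List.pyGet? letters (-1) with
    | some f, some l =>
      let ordered := [f] ++ PySem.List.sorted (PySem.List.slice letters (some 1) (some (-1))) (fun c => c) false ++ [l]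
      pvMerge word ordered
    | _, _ => []  -- unreachable under Pre_: Python raises IndexError when letters is empty

def scramble_words_alt (words : String) : String :=
  if words.toList = [] then ""
  else String.ofList (PySem.Chars.join [' '] ((PySem.Chars.splitOn words.toList [' ']).map pvBWord))

-- ===== PRECONDITION & SPEC =====
-- Pre_ excludes exactly the inputs on which A raises IndexError: a non-empty words string one of
-- whose space-split pieces contains no non-special character (e.g. "a  b" or "- x").
def Pre_scramble_words (words : String) : Prop :=
  words = "" ∨ ∀ w ∈ PySem.Chars.splitOn words.toList [' '], w.filter (fun c => ¬ c ∈ pvSpecials) ≠ []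
instance (words : String) : Decidable (Pre_scramble_words words) := by unfold Pre_scramble_words; infer_instance

def pvWitness_scramble_words : String := "hello, wrold"

def Spec_scramble_words (words : String) (out : String) : Prop := out = scramble_words_alt words
instance (words : String) (out : String) : Decidable (Spec_scramble_words words out) := by unfold Spec_scramble_words; infer_instance

-- ===== CLAIM (what is proved, stated in full; the proofs are below) =====
def Claim_equal_scramble_words : Prop := ∀ (words : String), Dom_scramble_words words → Pre_scramble_words words → Spec_scramble_words words (scramble_words words)

-- ===== LEMMAS AND PROOFS =====

-- recursively-defined special-char index list (proof helper characterising A's scan)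
def pvSpIdx (w : List Char) : List Nat :=
  match w with
  | [] => []
  | c :: cs => if c ∈ pvSpecials then 0 :: (pvSpIdx cs).map (· + 1) else (pvSpIdx cs).map (· + 1)

theorem pvRangeFilter (w : List Char) :
    (List.range w.length).filter (fun k => decide (w.getD k ' ' ∈ pvSpecials)) = pvSpIdx w := by
  induction w with
  | nil => rfl
  | cons c cs ih =>
    simp only [List.length_cons, List.range_succ_eq_map, pvSpIdx]
    by_cases h : c ∈ pvSpecials
    · simp [h, List.filter_map, Function.comp_def, ← ih]
      rfl
    · simp [h, List.filter_map, Function.comp_def, ← ih]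
      rfl

theorem pvScanEq (w : List Char) :
    (PySem.List.pyRange 0 (w.length : Int) 1).foldl
      (fun (st : List Int × List Char) i =>
        if PySem.List.pyGetD w i ' ' ∈ pvSpecials then (st.1 ++ [i], st.2)
        else (st.1, st.2 ++ [PySem.List.pyGetD w i ' '])) ([], [])
    = ((pvSpIdx w).map (fun (k : Nat) => (k : Int)), w.filter (fun c => ¬ c ∈ pvSpecials)) := by
  have hstep : (fun (st : List Int × List Char) i =>
      if PySem.List.pyGetD w i ' ' ∈ pvSpecials then (st.1 ++ [i], st.2)
      else (st.1, st.2 ++ [PySem.List.pyGetD w i ' ']))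
      = (fun (st : List Int × List Char) i =>
        ((fun a (i : Int) => if PySem.List.pyGetD w i ' ' ∈ pvSpecials then a ++ [i] else a) st.1 i,
         (fun b (i : Int) => if PySem.List.pyGetD w i ' ' ∈ pvSpecials then b
            else b ++ [PySem.List.pyGetD w i ' ']) st.2 i)) := by
    funext st i
    by_cases h : PySem.List.pyGetD w i ' ' ∈ pvSpecials <;> simp [h]
  rw [hstep, PySem.List.foldl_prod_mk
    (fun a (i : Int) => if PySem.List.pyGetD w i ' ' ∈ pvSpecials then a ++ [i] else a)
    (fun b (i : Int) => if PySem.List.pyGetD w i ' ' ∈ pvSpecials then b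
      else b ++ [PySem.List.pyGetD w i ' '])]
  apply Prod.ext
  · show List.foldl _ _ _ = _
    rw [PySem.List.foldl_append_ite_eq_filter (fun i => PySem.List.pyGetD w i ' ' ∈ pvSpecials),
      PySem.List.pyRange_zero_nat, List.filter_map]
    simp only [Function.comp_def, PySem.List.pyGetD_natCast, List.nil_append]
    rw [pvRangeFilter]
  · show List.foldl _ _ _ = _
    rw [show ((w.length : Int)) = PySem.List.len w from rfl,
      PySem.List.foldl_pyRange_pyGetD w ' '
        (fun acc c => if c ∈ pvSpecials then acc else acc ++ [c]) [] le_rfl]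
    have hflip : (fun (acc : List Char) c => if c ∈ pvSpecials then acc else acc ++ [c])
        = (fun (acc : List Char) c => if ¬ c ∈ pvSpecials then acc ++ [c] else acc) := by
      funext acc c
      by_cases h : c ∈ pvSpecials <;> simp [h]
    rw [Int.toNat_zero, List.drop_zero, hflip,
      PySem.List.foldl_append_ite_eq_filter (fun c => ¬ c ∈ pvSpecials)]
    rfl

-- shift: inserting at positions k+1 into x :: s is x :: inserting at k into s
theorem pvShift (g : Nat → Char) (idxs : List Nat) (x : Char) (s : List Char) :
    ((idxs.map (· + 1)).foldl (fun s k => s.take k ++ [g k] ++ s.drop k) (x :: s))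
      = x :: idxs.foldl (fun s k => s.take k ++ [g (k + 1)] ++ s.drop k) s := by
  induction idxs generalizing x s with
  | nil => rfl
  | cons k ks ih =>
    simp only [List.map_cons, List.foldl_cons, List.take_succ_cons, List.drop_succ_cons]
    exact ih x _

-- the heart: A's splice loop over the special indices equals B's merge pass
theorem pvInsEqMerge (w : List Char) (r : List Char)
    (hr : r.length = (w.filter (fun c => ¬ c ∈ pvSpecials)).length) :
    (pvSpIdx w).foldl (fun s k => s.take k ++ [w.getD k ' '] ++ s.drop k) r = pvMerge w r := by
  induction w generalizing r with
  | nil =>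
    simp only [List.filter_nil, List.length_nil, List.length_eq_zero_iff] at hr
    subst hr
    rfl
  | cons c cs ih =>
    by_cases h : c ∈ pvSpecials
    · simp only [pvSpIdx, if_pos h, List.foldl_cons, List.take_zero, List.drop_zero,
        List.getD_cons_zero, List.nil_append]
      rw [show (([c] ++ r : List Char)) = c :: r from rfl, pvShift]
      simp only [List.getD_cons_succ]
      rw [List.filter_cons_of_neg (by simp [h])] at hr
      rw [ih r hr]
      simp [pvMerge, h]
    · have hlen : r.length = ((cs.filter fun c => ¬ c ∈ pvSpecials).length) + 1 := by
        rw [List.filter_cons_of_pos (by simp [h])] at hr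
        simpa using hr
      obtain ⟨o, r', rfl⟩ : ∃ o r', r = o :: r' := by
        cases r with
        | nil => simp at hlen
        | cons o r' => exact ⟨o, r', rfl⟩
      simp only [pvSpIdx, if_neg h]
      rw [pvShift]
      simp only [List.getD_cons_succ]
      rw [ih r' (by simp only [List.length_cons] at hlen; omega)]
      simp [pvMerge, h]

theorem pvWordEq (w : List Char) (h : w.filter (fun c => ¬ c ∈ pvSpecials) ≠ []) :
    pvAWord w = pvBWord w := by
  unfold pvAWord pvBWord
  rw [pvScanEq]
  by_cases h1 : (w.filter (fun c => ¬ c ∈ pvSpecials)).length = 1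
  · simp only [h1, if_pos]
  · simp only [if_neg h1]
    obtain ⟨f, t, hft⟩ : ∃ f t, w.filter (fun c => ¬ c ∈ pvSpecials) = f :: t := by
      cases hc : w.filter (fun c => ¬ c ∈ pvSpecials) with
      | nil => exact absurd hc h
      | cons f t => exact ⟨f, t, rfl⟩
    rw [hft, PySem.List.pyGet?_zero_cons, PySem.List.pyGet?_neg_one,
      List.getLast?_eq_some_getLast (l := f :: t) (by simp)]
    dsimp only
    have hlen : ([f] ++ PySem.List.sorted (PySem.List.slice (f :: t) (some 1) (some (-1)))
          (fun c => c) false ++ [(f :: t).getLast (by simp)]).length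
        = (w.filter (fun c => ¬ c ∈ pvSpecials)).length := by
      rw [hft] at h1 ⊢
      simp only [List.length_append, List.length_cons, List.length_nil,
        PySem.List.length_sorted, PySem.List.length_slice, PySem.List.clampIdx_neg_one]
      rw [show ((1 : Int)) = ((1 : Nat) : Int) from rfl, PySem.List.clampIdx_natCast]
      simp only [List.length_cons] at h1 ⊢
      omega
    rw [List.foldl_map]
    simp only [PySem.List.slice_to_natCast, PySem.List.slice_from_natCast,
      PySem.List.pyGetD_natCast]
    exact pvInsEqMerge w _ hlen

-- ===== VERDICT (by name: the statement is the Claim_ definition above) =====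
theorem scramble_words_spec : Claim_equal_scramble_words := by
  intro words _ hpre
  unfold Spec_scramble_words scramble_words scramble_words_alt
  by_cases hnil : words.toList = []
  · simp [hnil]
  · simp only [hnil]
    rw [PySem.List.foldl_append_singleton_eq_map]
    rcases hpre with h | h
    · exact absurd (by simp [h]) hnil
    · simp only [List.nil_append]
      rw [List.map_congr_left fun w hw => pvWordEq w (h w hw)]
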